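-- pv_equiv track=rewrite | github.com/xwshiba/100-day-programming | 011- 100 cs61a Lab/lab 04 preparation.py | missing_digits
-- ===== SOURCE A (Python) =====
-- def missing_digits(n):
--     """Given a number a that is in sorted, increasing order,
--     return the number of missing digits in n. A missing digit is
--     a number between the first and last digit of a that is not in n.
--
--     Write the recursive function missing_digits that takes a number n
--     that is sorted in increasing order
--     (for example, 12289 is valid but 15362 and 98764 are not).
--     It returns the number of missing digits in n.
--     A missing digit is a number between the first and last digit of n of a that is not in n.
--
--
--     >>> missing_digits(1248) # 3, 5, 6, 7
--     4
--     >>> missing_digits(1122) # No missing numbers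
--     0
--     >>> missing_digits(123456) # No missing numbers
--     0
--     >>> missing_digits(3558) # 4, 6, 7
--     3
--     >>> missing_digits(35578) # 4, 6
--     2
--     >>> missing_digits(12456) # 3
--     1
--     >>> missing_digits(16789) # 2, 3, 4, 5
--     4
--     >>> missing_digits(19) # 2, 3, 4, 5, 6, 7, 8
--     7
--     >>> missing_digits(4) # No missing numbers between 4 and 4
--     0
--     """
--     all_but_last, second_last, last = n // 10, n // 10 % 10, n % 10
--     cond = last - second_last - 1
--     if all_but_last == 0:
--         return 0
--     else:
--         if cond <= 0:
--             return missing_digits(all_but_last)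
--         else:
--             return cond + missing_digits(all_but_last)
-- ===== SOURCE B (Python) =====
-- def missing_digits(n):
--     count = 0
--     while n >= 10:
--         count += max(0, n % 10 - n // 10 % 10 - 1)
--         n //= 10
--     return count
-- ===== Notes on version B (the rewrite author's own statement) =====
-- stated objective: alternative
-- what changed: Replaces A's non-tail recursion over adjacent digit pairs by an iterative while-loop with an explicit accumulator (adding max(0, gap) per pair).
-- outside the precondition, e.g. on missing_digits(-1): A raises RecursionError, B returns 0
import Mathlib
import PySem

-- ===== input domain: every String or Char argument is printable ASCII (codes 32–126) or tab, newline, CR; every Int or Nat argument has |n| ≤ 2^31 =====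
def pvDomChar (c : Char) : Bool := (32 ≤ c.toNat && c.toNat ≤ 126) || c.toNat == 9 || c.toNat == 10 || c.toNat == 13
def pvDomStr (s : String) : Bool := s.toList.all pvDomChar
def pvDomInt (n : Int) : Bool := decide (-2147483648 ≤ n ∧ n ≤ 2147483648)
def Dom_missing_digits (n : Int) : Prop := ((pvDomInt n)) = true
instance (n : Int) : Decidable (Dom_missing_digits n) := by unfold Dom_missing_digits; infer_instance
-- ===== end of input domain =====

-- B replaces A's recursion over adjacent digit pairs by an iterative accumulator loop (same cost, different decomposition).


-- ===== PORT A =====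
-- A's recursion on n // 10; on the admitted domain n ≥ 0, Python's // and % on
-- nonnegative ints coincide with Nat division, so the recursion runs on n.toNat.
def missingDigitsRecA (n : Nat) : Int :=
  let all_but_last := n / 10
  let cond : Int := (n % 10 : Nat) - ((all_but_last % 10 : Nat) : Int) - 1
  if all_but_last = 0 then 0
  else
    if cond ≤ 0 then missingDigitsRecA all_but_last
    else cond + missingDigitsRecA all_but_last
termination_by n
decreasing_by
  all_goals exact Nat.div_lt_self (Nat.pos_of_ne_zero (by omega)) (by omega)

def missing_digits (n : Int) : Int := missingDigitsRecA n.toNat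

-- ===== PORT B =====
-- B's while-loop with accumulator: while n >= 10, add max(0, n%10 - n//10%10 - 1), n //= 10.
def missingDigitsLoopB (n : Nat) (count : Int) : Int :=
  if n < 10 then count
  else missingDigitsLoopB (n / 10)
        (count + max 0 ((n % 10 : Nat) - ((n / 10 % 10 : Nat) : Int) - 1))
termination_by n
decreasing_by
  have : n / 10 < n := Nat.div_lt_self (by omega) (by omega)
  omega

def missing_digits_alt (n : Int) : Int := missingDigitsLoopB n.toNat 0

-- ===== PRECONDITION & SPEC =====
-- Pre_ excludes negative n, on which the Python A recurses forever on -1 and raises RecursionError.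
def Pre_missing_digits (n : Int) : Prop := 0 ≤ n
instance (n : Int) : Decidable (Pre_missing_digits n) := by unfold Pre_missing_digits; infer_instance
def pvWitness_missing_digits : Int := (1248)

def Spec_missing_digits (n : Int) (out : Int) : Prop := out = missing_digits_alt n
instance (n : Int) (out : Int) : Decidable (Spec_missing_digits n out) := by unfold Spec_missing_digits; infer_instance

-- ===== CLAIM (what is proved, stated in full; the proofs are below) =====
def Claim_equal_missing_digits : Prop := ∀ (n : Int), Dom_missing_digits n → Pre_missing_digits n → Spec_missing_digits n (missing_digits n)

-- ===== LEMMAS AND PROOFS =====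
-- Loop invariant: the accumulator passes straight through, so B's loop computes A's recursion plus the accumulator.
theorem loopB_eq_recA (n : Nat) (count : Int) :
    missingDigitsLoopB n count = count + missingDigitsRecA n := by
  induction n using Nat.strong_induction_on generalizing count with
  | _ n ih =>
    rw [missingDigitsLoopB, missingDigitsRecA]
    by_cases h : n < 10
    · have h0 : n / 10 = 0 := Nat.div_eq_of_lt h
      simp [h, h0]
    · have hlt : n / 10 < n := Nat.div_lt_self (by omega) (by omega)
      have hne : ¬ n / 10 = 0 := by
        rw [Nat.div_eq_zero_iff]; omega
      simp only [h, if_false, hne, if_false]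
      rw [ih _ hlt]
      by_cases hcle : ((n % 10 : Nat) : Int) - ((n / 10 % 10 : Nat) : Int) - 1 ≤ 0
      · rw [if_pos hcle, max_eq_left (by omega)]
        ring
      · rw [if_neg hcle, max_eq_right (by omega)]
        ring

-- ===== VERDICT (by name: the statement is the Claim_ definition above) =====
theorem missing_digits_spec : Claim_equal_missing_digits := by
  intro n _ _
  unfold Spec_missing_digits missing_digits missing_digits_alt
  rw [loopB_eq_recA]; ring
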